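-- pv_equiv track=rewrite | github.com/redshodan/unsonic | unsonic/config.py | collapseRelativePaths
-- ===== SOURCE A (Python) =====
-- def collapseRelativePaths(path):
--     output = []
--     skip = 0
--     bits = path.split("/")
--     bits.reverse()
--     for bit in bits:
--         if bit == "..":
--             skip += 1
--         else:
--             if skip > 0:
--                 skip -= 1
--                 continue
--             else:
--                 output.append(bit)
--     output.reverse()
--     return "/".join(output)
-- ===== SOURCE B (Python) =====
-- def collapseRelativePaths(path):
--     stack = []
--     for bit in path.split("/"):
--         if bit == "..":
--             if stack:
--                 stack.pop()
--         else:
--             stack.append(bit)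
--     return "/".join(stack)
-- ===== Notes on version B (the rewrite author's own statement) =====
-- stated objective: simpler
-- what changed: Replaced the reverse-the-list / skip-counter / reverse-the-output scheme by a single forward pass with a stack (push a segment, pop on '..'), with no reversals and no counter.
import Mathlib
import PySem

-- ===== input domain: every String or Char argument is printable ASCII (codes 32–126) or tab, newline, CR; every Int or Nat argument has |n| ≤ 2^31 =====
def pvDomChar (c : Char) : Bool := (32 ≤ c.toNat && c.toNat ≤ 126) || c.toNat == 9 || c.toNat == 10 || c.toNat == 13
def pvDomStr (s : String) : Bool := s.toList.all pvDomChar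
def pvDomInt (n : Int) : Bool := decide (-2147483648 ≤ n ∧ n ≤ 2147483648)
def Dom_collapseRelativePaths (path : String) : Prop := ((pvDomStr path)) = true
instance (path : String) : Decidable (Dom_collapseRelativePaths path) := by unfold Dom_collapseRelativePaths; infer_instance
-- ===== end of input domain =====

-- B replaces A's reverse/skip-counter/reverse scheme by one forward pass with a stack; objective: simpler.

-- ===== PORT A =====
-- A's loop step over the reversed segment list, state = (output, skip).
-- Python's skip is an int but the 'if skip > 0' guard keeps it ≥ 0, so Nat is exact here.
def collapseStepA (acc : List String × Nat) (bit : String) : List String × Nat :=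
  if bit == ".." then (acc.1, acc.2 + 1)
  else if acc.2 > 0 then (acc.1, acc.2 - 1)
  else (acc.1 ++ [bit], acc.2)

def collapseRelativePaths (path : String) : String :=
  -- split? is some … for the non-empty literal separator "/"; getD [] never fires
  let bits := ((PySem.Str.split? path "/").getD []).reverse
  let st := bits.foldl collapseStepA ([], 0)
  PySem.Str.join "/" st.1.reverse

-- ===== PORT B =====
-- B's loop step: push the segment, pop (if non-empty) on "..".
def collapseStepB (stack : List String) (bit : String) : List String :=
  if bit == ".." then stack.dropLast else stack ++ [bit]

def collapseRelativePaths_alt (path : String) : String :=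
  PySem.Str.join "/" (((PySem.Str.split? path "/").getD []).foldl collapseStepB [])

-- ===== PRECONDITION & SPEC =====
def Spec_collapseRelativePaths (path : String) (out : String) : Prop := out = collapseRelativePaths_alt path
instance (path : String) (out : String) : Decidable (Spec_collapseRelativePaths path out) := by unfold Spec_collapseRelativePaths; infer_instance

-- ===== CLAIM (what is proved, stated in full; the proofs are below) =====
def Claim_equal_collapseRelativePaths : Prop := ∀ (path : String), Dom_collapseRelativePaths path → Spec_collapseRelativePaths path (collapseRelativePaths path)

-- ===== LEMMAS AND PROOFS =====

-- Bridge: B's forward fold from any initial stack s equals s minus the uncancelled-'..'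
-- pops of A's right-to-left pass, followed by A's output (reversed back to forward order).
theorem collapse_stack_eq_skip (l : List String) : ∀ (s : List String),
    l.foldl collapseStepB s =
      s.take (s.length - (l.foldr (fun x acc => collapseStepA acc x) ([], 0)).2)
        ++ (l.foldr (fun x acc => collapseStepA acc x) ([], 0)).1.reverse := by
  induction l with
  | nil => intro s; simp
  | cons x l ih =>
    intro s
    simp only [List.foldl_cons, List.foldr_cons, ih]
    set r := l.foldr (fun x acc => collapseStepA acc x) ([], 0) with hr
    by_cases hx : x = ".."
    · -- '..' : B pops from s; A increments skip
      simp only [collapseStepB, collapseStepA, hx, beq_self_eq_true, if_true]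
      have hdl : (s.dropLast : List String) = s.take (s.length - 1) := by
        simp [List.dropLast_eq_take]
      rw [hdl, List.take_take, List.length_take]
      congr 2
      omega
    · simp only [collapseStepB, collapseStepA, beq_iff_eq, hx, if_false]
      by_cases hk : r.2 > 0
      · -- skip cancels this segment; B's extra push is taken away again
        simp only [hk, if_true]
        rw [List.take_append_of_le_length (by simp; omega)]
        congr 2
        simp
        omega
      · simp only [hk, if_false]
        have hk0 : r.2 = 0 := by omega
        simp [hk0, List.take_append]

-- ===== VERDICT (by name: the statement is the Claim_ definition above) =====
theorem collapseRelativePaths_spec : Claim_equal_collapseRelativePaths := by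
  intro path _
  unfold Spec_collapseRelativePaths collapseRelativePaths collapseRelativePaths_alt
  dsimp only
  rw [List.foldl_reverse]
  rw [collapse_stack_eq_skip]
  simp
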